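-- pv_equiv track=rewrite | github.com/ABlued/PythonPractice | week4/homework/03_get_all_ways_of_theater_seat.py | get_all_ways_of_theater_seat
-- ===== SOURCE A (Python) =====
-- number_of_cases_where_a_person_can_sit = {
--     1:1,
--     2:2,
--     3:3,
--     4:5,
--     5:8,
--     6:13,
--     7:21,
--     8:34,
-- }
--
-- def Fibo(n):
--     if n in number_of_cases_where_a_person_can_sit:
--         return number_of_cases_where_a_person_can_sit[n]
--     if len(list(filter(lambda k : k in number_of_cases_where_a_person_can_sit.keys(), [n - 1, n - 2]))) > 1:
--         number_of_cases_where_a_person_can_sit[n] = number_of_cases_where_a_person_can_sit[n - 1] + number_of_cases_where_a_person_can_sit[n - 2]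
--     return Fibo(n - 1) + Fibo(n - 2)
--
-- def get_all_ways_of_theater_seat(total_count, fixed_seat_array):
--
--     array = []
--     result = 1
--     count = 0
--     for i in range (total_count):
--         array.append(i + 1)
--
--     while array:
--         if array.pop(0) in fixed_seat_array:
--             result *= Fibo(count)
--             count = 0
--         else :
--             count += 1
--     if count != 0:
--         result *= Fibo(count)
--
--     return result
-- ===== SOURCE B (Python) =====
-- def _ways(length):
--     # number of ways to seat a free run of `length` seats (Fibonacci, iterative)
--     a, b = 1, 1
--     for _ in range(length):
--         a, b = b, a + b
--     return a
--
-- def get_all_ways_of_theater_seat(total_count, fixed_seat_array):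
--     n = total_count if total_count > 0 else 0
--     fixed = sorted({s for s in fixed_seat_array if 1 <= s <= n})
--     result = 1
--     prev = 0
--     for s in fixed:
--         result *= _ways(s - prev - 1)
--         prev = s
--     return result * _ways(n - prev)
-- ===== Notes on version B (the rewrite author's own statement) =====
-- stated objective: faster
-- what changed: Instead of building the seat list and scanning it with pop(0) while computing each run's count via a recursive memo-dict Fibonacci, B sorts the distinct in-range fixed seats and multiplies one iterative-Fibonacci factor per gap between them.
import Mathlib
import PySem

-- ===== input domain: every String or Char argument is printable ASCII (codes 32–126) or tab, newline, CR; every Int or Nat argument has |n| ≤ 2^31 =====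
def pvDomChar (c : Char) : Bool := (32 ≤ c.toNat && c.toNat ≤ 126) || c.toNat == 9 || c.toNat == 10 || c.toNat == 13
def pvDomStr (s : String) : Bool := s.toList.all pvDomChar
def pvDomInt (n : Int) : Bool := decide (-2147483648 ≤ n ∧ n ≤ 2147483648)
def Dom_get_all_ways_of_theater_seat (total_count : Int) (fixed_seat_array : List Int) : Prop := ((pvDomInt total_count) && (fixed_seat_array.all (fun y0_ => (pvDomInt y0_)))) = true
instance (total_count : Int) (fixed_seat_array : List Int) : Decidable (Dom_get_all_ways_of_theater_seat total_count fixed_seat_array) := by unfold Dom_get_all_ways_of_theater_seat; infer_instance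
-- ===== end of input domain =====

-- B replaces A's seat-by-seat pop(0) scan with its memo-dict recursive Fibonacci by sorting the
-- distinct in-range fixed seats and multiplying one iterative-Fibonacci factor per gap.

-- ===== PORT A =====

-- the module-level dict number_of_cases_where_a_person_can_sit (as a fresh process has it)
def pvMemo0 : PySem.Dict Int Int :=
  PySem.Dict.ofList [(1,1),(2,2),(3,3),(4,5),(5,8),(6,13),(7,21),(8,34)]

-- Fibo, with the global dict threaded through; the fuel only makes the recursion total
-- (Python recurses without end for n ≤ 0 and raises: that is `none` here, excluded by Pre_)
def pvFibo : Nat → PySem.Dict Int Int → Int → Option (Int × PySem.Dict Int Int)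
  | 0, _, _ => none
  | fuel+1, memo, n =>
    match memo.get? n with
    | some v => some (v, memo)
    | none =>
      -- if len(list(filter(lambda k: k in dict.keys(), [n-1, n-2]))) > 1: dict[n] = dict[n-1] + dict[n-2]
      let memo1 := if ([n-1, n-2].filter (fun k => memo.contains k)).length > 1
        then memo.insert n (memo.getD (n-1) 0 + memo.getD (n-2) 0)  -- getD exact: both keys present in this branch
        else memo
      match pvFibo fuel memo1 (n-1) with
      | none => none
      | some (v1, m1) =>
        match pvFibo fuel m1 (n-2) with
        | none => none
        | some (v2, m2) => some (v1 + v2, m2)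

-- the while loop: pop(0) consumes the array front to back; state (result, count, dict)
def pvLoopA (fixed : List Int) : List Int → Int → Int → PySem.Dict Int Int → Option (Int × Int × PySem.Dict Int Int)
  | [], r, c, m => some (r, c, m)
  | s :: rest, r, c, m =>
    if fixed.contains s then
      match pvFibo (c.toNat + 1) m c with
      | none => none
      | some (v, m') => pvLoopA fixed rest (r * v) 0 m'
    else pvLoopA fixed rest r (c + 1) m

def get_all_ways_of_theater_seat (total_count : Int) (fixed_seat_array : List Int) : Int :=
  -- for i in range(total_count): array.append(i + 1)  — the append loop, in its map form
  let array := (PySem.List.pyRange 0 total_count 1).map (fun i => i + 1)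
  match pvLoopA fixed_seat_array array 1 0 pvMemo0 with
  | none => 0  -- unreachable under Pre_ (Python raises there)
  | some (r, c, m) =>
    if c ≠ 0 then
      match pvFibo (c.toNat + 1) m c with
      | none => 0  -- unreachable under Pre_
      | some (v, _) => r * v
    else r

-- ===== PORT B =====

-- iterative Fibonacci: number of seating orders of a free run of `len` seats
def pvWays (len : Int) : Int :=
  ((PySem.List.pyRange 0 len 1).foldl (fun (ab : Int × Int) _ => (ab.2, ab.1 + ab.2)) (1, 1)).1

def get_all_ways_of_theater_seat_alt (total_count : Int) (fixed_seat_array : List Int) : Int :=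
  let n := if total_count > 0 then total_count else 0
  let fixed := PySem.List.sorted
    (PySem.Set.ofList (fixed_seat_array.filter (fun s => decide (1 ≤ s) && decide (s ≤ n))))
    (fun x => x) false
  let rp := fixed.foldl (fun (rp : Int × Int) s => (rp.1 * pvWays (s - rp.2 - 1), s)) (1, 0)
  rp.1 * pvWays (n - rp.2)

-- ===== PRECONDITION & SPEC =====

-- Pre_ excludes the inputs where A raises RecursionError: (1st conjunct) a fixed seat that is seat 1
-- or directly follows another fixed seat makes A call Fibo(0), which recurses without end; (2nd
-- conjunct) a run of ≥ 900 consecutive free seats (a length-900 seat window with no fixed seat)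
-- makes Fibo recurse beyond Python's default recursion limit — A raises near run length 1000 in a
-- fresh process, the exact threshold depending on stack state, so the bound is conservative and a
-- few inputs on which A would still return (free runs of 900..~1000 seats) are excluded with it.
def Pre_get_all_ways_of_theater_seat (total_count : Int) (fixed_seat_array : List Int) : Prop :=
  (∀ s ∈ fixed_seat_array, 1 ≤ s → s ≤ total_count → (s ≠ 1 ∧ s - 1 ∉ fixed_seat_array)) ∧
  (900 ≤ total_count → ∃ s ∈ fixed_seat_array, 1 ≤ s ∧ s ≤ 900) ∧
  (∀ s ∈ fixed_seat_array, 1 ≤ s → s + 900 ≤ total_count + 1 →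
    ∃ s' ∈ fixed_seat_array, s < s' ∧ s' ≤ s + 900 ∧ s' ≤ total_count)
instance (total_count : Int) (fixed_seat_array : List Int) : Decidable (Pre_get_all_ways_of_theater_seat total_count fixed_seat_array) := by unfold Pre_get_all_ways_of_theater_seat; infer_instance

def pvWitness_get_all_ways_of_theater_seat : Int × List Int := (7, [3, 6])

def Spec_get_all_ways_of_theater_seat (total_count : Int) (fixed_seat_array : List Int) (out : Int) : Prop := out = get_all_ways_of_theater_seat_alt total_count fixed_seat_array
instance (total_count : Int) (fixed_seat_array : List Int) (out : Int) : Decidable (Spec_get_all_ways_of_theater_seat total_count fixed_seat_array out) := by unfold Spec_get_all_ways_of_theater_seat; infer_instance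

-- ===== CLAIM (what is proved, stated in full; the proofs are below) =====
def Claim_equal_get_all_ways_of_theater_seat : Prop := ∀ (total_count : Int) (fixed_seat_array : List Int), Dom_get_all_ways_of_theater_seat total_count fixed_seat_array → Pre_get_all_ways_of_theater_seat total_count fixed_seat_array → Spec_get_all_ways_of_theater_seat total_count fixed_seat_array (get_all_ways_of_theater_seat total_count fixed_seat_array)

-- ===== LEMMAS AND PROOFS =====

-- specification Fibonacci: ways n = number of seating orders of a free run of n seats
def ways : Nat → Int
  | 0 => 1
  | 1 => 1
  | n+2 => ways (n+1) + ways n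

lemma ways_rec (n : Nat) (h : 2 ≤ n) : ways n = ways (n-1) + ways (n-2) := by
  obtain ⟨m, rfl⟩ : ∃ m, n = m + 2 := ⟨n - 2, by omega⟩
  simp [ways]

-- the memo-dict invariant: keys 1 and 2 present, every entry a correct Fibonacci value at a key ≥ 1
def GoodMemo (m : PySem.Dict Int Int) : Prop :=
  m.get? 1 = some 1 ∧ m.get? 2 = some 2 ∧ ∀ k v, m.get? k = some v → 1 ≤ k ∧ v = ways k.toNat

lemma goodMemo0 : GoodMemo pvMemo0 := by
  refine ⟨by decide, by decide, ?_⟩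
  intro k v h
  have hm := PySem.Dict.mem_items_of_get?_eq_some pvMemo0 h
  have : pvMemo0.items = [(1,1),(2,2),(3,3),(4,5),(5,8),(6,13),(7,21),(8,34)] := by decide
  rw [this] at hm
  simp only [List.mem_cons, List.not_mem_nil, or_false, Prod.mk.injEq] at hm
  rcases hm with ⟨rfl, rfl⟩|⟨rfl, rfl⟩|⟨rfl, rfl⟩|⟨rfl, rfl⟩|⟨rfl, rfl⟩|⟨rfl, rfl⟩|⟨rfl, rfl⟩|⟨rfl, rfl⟩ <;>
    exact ⟨by omega, by decide⟩

lemma goodInsert (m : PySem.Dict Int Int) (n : Int) (hn : 3 ≤ n)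
    (hg : GoodMemo m) : GoodMemo (m.insert n (ways n.toNat)) := by
  obtain ⟨g1, g2, g3⟩ := hg
  refine ⟨?_, ?_, ?_⟩
  · rw [PySem.Dict.get?_insert_of_ne m _ (by omega)]; exact g1
  · rw [PySem.Dict.get?_insert_of_ne m _ (by omega)]; exact g2
  · intro k v h
    rw [PySem.Dict.get?_insert m n k _] at h
    split at h
    · rename_i hk; cases h; exact ⟨by omega, by rw [hk]⟩
    · exact g3 k v h

lemma pvFibo_correct : ∀ (f : Nat) (m : PySem.Dict Int Int) (n : Int), GoodMemo m → 1 ≤ n → n.toNat < f →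
    ∃ m', pvFibo f m n = some (ways n.toNat, m') ∧ GoodMemo m' := by
  intro f
  induction f with
  | zero => intro m n _ _ hf; omega
  | succ f ih =>
    intro m n hg h1 hf
    obtain ⟨g1, g2, g3⟩ := hg
    cases hget : m.get? n with
    | some v =>
      obtain ⟨_, rfl⟩ := g3 n v hget
      exact ⟨m, by simp only [pvFibo, hget], g1, g2, g3⟩
    | none =>
      have hn1 : n ≠ 1 := by rintro rfl; rw [g1] at hget; cases hget
      have hn2 : n ≠ 2 := by rintro rfl; rw [g2] at hget; cases hget
      have hn3 : 3 ≤ n := by omega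
      have hgm1 : GoodMemo (if ([n-1, n-2].filter (fun k => m.contains k)).length > 1
          then m.insert n (m.getD (n-1) 0 + m.getD (n-2) 0)
          else m) := by
        split
        · rename_i hc
          obtain ⟨c1, c2⟩ : m.contains (n-1) = true ∧ m.contains (n-2) = true := by
            cases hb1 : m.contains (n-1) <;> cases hb2 : m.contains (n-2) <;>
              simp [hb1, hb2, List.filter] at hc ⊢
          rw [PySem.Dict.contains_eq_isSome_get? m (n-1)] at c1
          rw [PySem.Dict.contains_eq_isSome_get? m (n-2)] at c2
          obtain ⟨v1, hv1⟩ := Option.isSome_iff_exists.mp c1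
          obtain ⟨v2, hv2⟩ := Option.isSome_iff_exists.mp c2
          obtain ⟨_, rfl⟩ := g3 _ _ hv1
          obtain ⟨_, rfl⟩ := g3 _ _ hv2
          have e : m.getD (n-1) 0 + m.getD (n-2) 0 = ways n.toNat := by
            rw [PySem.Dict.getD_of_get?_eq_some m 0 hv1, PySem.Dict.getD_of_get?_eq_some m 0 hv2]
            rw [ways_rec n.toNat (by omega)]
            congr 2 <;> omega
          rw [e]
          exact goodInsert m n hn3 ⟨g1, g2, g3⟩
        · exact ⟨g1, g2, g3⟩
      have a1 : (1:Int) ≤ n - 1 := by omega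
      have a2 : (n-1).toNat < f := by omega
      have a3 : (1:Int) ≤ n - 2 := by omega
      have a4 : (n-2).toNat < f := by omega
      obtain ⟨m1, e1, hm1⟩ := ih _ (n-1) hgm1 a1 a2
      obtain ⟨m2, e2, hm2⟩ := ih m1 (n-2) hm1 a3 a4
      refine ⟨m2, ?_, hm2⟩
      simp only [pvFibo, hget, e1, e2]
      congr 2
      rw [ways_rec n.toNat (by omega)]
      congr 2 <;> omega

-- the consecutive seat segment [a, a+1, …, a+L-1]
def seg (a : Int) : Nat → List Int
  | 0 => []
  | L+1 => a :: seg (a+1) L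

lemma seg_append (k : Nat) : ∀ (L : Nat) (a : Int), seg a (k + L) = seg a k ++ seg (a + k) L := by
  induction k with
  | zero => intro L a; simp [seg]
  | succ k ih =>
    intro L a
    have h : k + 1 + L = (k + L) + 1 := by omega
    rw [h]
    show a :: seg (a+1) (k+L) = (a :: seg (a+1) k) ++ seg (a + (k+1)) L
    rw [ih L (a+1)]
    simp only [List.cons_append]
    have e : a + 1 + (k:Int) = a + (k+1) := by ring
    rw [e]

lemma loopA_append (fixed : List Int) : ∀ (l1 l2 : List Int) (r c : Int) (m : PySem.Dict Int Int),
    pvLoopA fixed (l1 ++ l2) r c m =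
      match pvLoopA fixed l1 r c m with
      | none => none
      | some (r1, c1, m1) => pvLoopA fixed l2 r1 c1 m1 := by
  intro l1
  induction l1 with
  | nil => intro l2 r c m; simp [pvLoopA]
  | cons s t ih =>
    intro l2 r c m
    simp only [List.cons_append, pvLoopA]
    split
    · cases pvFibo (c.toNat + 1) m c with
      | none => rfl
      | some p => exact ih l2 (r * p.1) 0 p.2
    · exact ih l2 r (c+1) m

lemma loopA_append_some (fixed l1 l2 : List Int) (r c : Int) (m : PySem.Dict Int Int)
    (r1 c1 : Int) (m1 : PySem.Dict Int Int) (h : pvLoopA fixed l1 r c m = some (r1, c1, m1)) :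
    pvLoopA fixed (l1 ++ l2) r c m = pvLoopA fixed l2 r1 c1 m1 := by
  rw [loopA_append fixed, h]

lemma loopA_free (fixed : List Int) : ∀ (L : Nat) (a r c : Int) (m : PySem.Dict Int Int),
    (∀ s : Int, a ≤ s → s < a + L → fixed.contains s = false) →
    pvLoopA fixed (seg a L) r c m = some (r, c + L, m) := by
  intro L
  induction L with
  | zero => intro a r c m _; simp [seg, pvLoopA]
  | succ L ih =>
    intro a r c m h
    have ha : fixed.contains a = false := h a le_rfl (by push_cast; omega)
    simp only [seg, pvLoopA, ha]
    rw [ih (a+1) r (c+1) m (fun s h1 h2 => h s (by omega) (by push_cast at h2 ⊢; omega))]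
    have e : c + 1 + (L : Int) = c + ((L : Int) + 1) := by ring
    rw [e]
    push_cast
    rfl

-- the product of per-gap Fibonacci factors: B's value in specification form
def gapProd : Int → List Int → Int → Int
  | prev, [], b => ways (b - prev).toNat
  | prev, f :: t, b => ways (f - prev - 1).toNat * gapProd f t b

lemma loopA_main : ∀ (fs : List Int) (L : Nat) (a r c : Int) (m : PySem.Dict Int Int) (fixed : List Int),
    GoodMemo m → 0 ≤ c →
    fs.Pairwise (fun x y => x + 2 ≤ y) →
    (∀ s ∈ fs, a ≤ s ∧ s < a + L) →
    (∀ s : Int, a ≤ s → s < a + L → (fixed.contains s = true ↔ s ∈ fs)) →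
    (∀ f ∈ fs.head?, 1 ≤ c + f - a) →
    ∃ r' c' m', pvLoopA fixed (seg a L) r c m = some (r', c', m') ∧ GoodMemo m' ∧ 0 ≤ c' ∧
      (if c' ≠ 0 then r' * ways c'.toNat else r') = r * gapProd (a - 1 - c) fs (a + L - 1) := by
  intro fs
  induction fs with
  | nil =>
    intro L a r c m fixed hg hc _ _ hiff _
    have hfree : ∀ s : Int, a ≤ s → s < a + L → fixed.contains s = false := by
      intro s h1 h2
      have := hiff s h1 h2
      simp only [List.not_mem_nil, iff_false] at this
      exact Bool.not_eq_true _ ▸ (by simpa using this)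
    refine ⟨r, c + L, m, loopA_free fixed L a r c m hfree, hg, by omega, ?_⟩
    have e : (a + L - 1) - (a - 1 - c) = c + L := by ring
    simp only [gapProd, e]
    by_cases h0 : c + (L:Int) = 0
    · rw [h0]
      norm_num [ways]
    · rw [if_pos h0]
  | cons f t ih =>
    intro L a r c m fixed hg hc hpw hbd hiff hhd
    obtain ⟨haf, hfL⟩ := hbd f (List.mem_cons_self)
    have hpair : ∀ s ∈ t, f + 2 ≤ s := (List.pairwise_cons.mp hpw).1
    have hpwt := (List.pairwise_cons.mp hpw).2
    set k := (f - a).toNat with hkdef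
    have hk : (k : Int) = f - a := by omega
    have hkL : k < L := by omega
    have hsegtail : seg (a + (k:Int)) (L - k) = f :: seg (f+1) (L-k-1) := by
      rw [show L - k = (L - k - 1) + 1 from by omega]
      show (a + (k:Int)) :: seg ((a + (k:Int)) + 1) (L-k-1) = f :: seg (f+1) (L-k-1)
      rw [show a + (k:Int) = f from by omega]
    have hsplit : seg a L = seg a k ++ (f :: seg (f+1) (L-k-1)) := by
      have h2 := seg_append k (L-k) a
      rw [show k + (L - k) = L from by omega] at h2
      rw [h2, hsegtail]
    have hfree : ∀ s : Int, a ≤ s → s < a + (k:Int) → fixed.contains s = false := by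
      intro s h1 h2
      have hiff' := hiff s h1 (by omega)
      have hnm : s ∉ f :: t := by
        intro hmem
        rcases List.mem_cons.mp hmem with rfl | hmem'
        · omega
        · have := hpair s hmem'; omega
      cases hcs : fixed.contains s
      · rfl
      · exact absurd (hiff'.mp hcs) hnm
    rw [hsplit, loopA_append_some fixed _ _ _ _ _ _ _ _ (loopA_free fixed k a r c m hfree)]
    have hcf : fixed.contains f = true := (hiff f haf hfL).mpr List.mem_cons_self
    have hck1 : 1 ≤ c + (k:Int) := by have := hhd f rfl; omega
    obtain ⟨m1, e1, hm1⟩ := pvFibo_correct ((c + (k:Int)).toNat + 1) m (c + (k:Int)) hg (by omega) (by omega)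
    have step : pvLoopA fixed (f :: seg (f+1) (L-k-1)) r (c + (k:Int)) m
        = pvLoopA fixed (seg (f+1) (L-k-1)) (r * ways (c + (k:Int)).toNat) 0 m1 := by
      simp only [pvLoopA, hcf, if_true, e1]
    rw [step]
    have hbd' : ∀ s ∈ t, f + 1 ≤ s ∧ s < f + 1 + ((L-k-1 : Nat) : Int) := by
      intro s hs
      have h2 := (hbd s (List.mem_cons_of_mem f hs)).2
      have h3 := hpair s hs
      omega
    have hiff' : ∀ s : Int, f + 1 ≤ s → s < f + 1 + ((L-k-1 : Nat) : Int) → (fixed.contains s = true ↔ s ∈ t) := by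
      intro s h1 h2
      have := hiff s (by omega) (by omega)
      rw [this]
      simp only [List.mem_cons]
      constructor
      · rintro (rfl | h) ; · omega
        · exact h
      · exact fun h => Or.inr h
    have hhd' : ∀ g ∈ t.head?, 1 ≤ 0 + g - (f + 1) := by
      intro g hgh
      have := hpair g (List.mem_of_mem_head? hgh)
      omega
    obtain ⟨r', c', m', e2, hm', hc', hval⟩ :=
      ih (L-k-1) (f+1) (r * ways (c + (k:Int)).toNat) 0 m1 fixed hm1 le_rfl hpwt hbd' hiff' hhd'
    refine ⟨r', c', m', e2, hm', hc', ?_⟩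
    rw [hval]
    simp only [gapProd]
    have eg : f - (a - 1 - c) - 1 = c + (k:Int) := by omega
    have eb : f + 1 + ((L-k-1 : Nat) : Int) - 1 = a + (L:Int) - 1 := by omega
    rw [eg, eb, show f + 1 - 1 - 0 = f from by ring, mul_assoc]

lemma foldpair : ∀ (l : List Int) (k : Nat),
    l.foldl (fun (ab : Int × Int) _ => (ab.2, ab.1 + ab.2)) (ways k, ways (k+1))
      = (ways (k + l.length), ways (k + l.length + 1)) := by
  intro l
  induction l with
  | nil => intro k; simp
  | cons x t ih =>
    intro k
    simp only [List.foldl_cons]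
    rw [show ((ways k, ways (k+1)).2, (ways k, ways (k+1)).1 + (ways k, ways (k+1)).2) = (ways (k+1), ways (k+1+1)) from by simp [ways]; omega]
    rw [ih (k+1)]
    simp only [List.length_cons]
    congr 2 <;> omega

lemma pvWays_eq (len : Int) : pvWays len = ways len.toNat := by
  unfold pvWays
  have := foldpair (PySem.List.pyRange 0 len 1) 0
  simp only [Nat.zero_add] at this
  rw [show ((1:Int),(1:Int)) = (ways 0, ways 1) from rfl, this]
  simp [PySem.List.length_pyRange_one]

lemma foldB (fs : List Int) : ∀ (r prev n : Int),
    (fs.foldl (fun (rp : Int × Int) s => (rp.1 * pvWays (s - rp.2 - 1), s)) (r, prev)).1 *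
      pvWays (n - (fs.foldl (fun (rp : Int × Int) s => (rp.1 * pvWays (s - rp.2 - 1), s)) (r, prev)).2)
    = r * gapProd prev fs n := by
  induction fs with
  | nil => intro r prev n; simp only [List.foldl_nil, gapProd, pvWays_eq]
  | cons f t ih =>
    intro r prev n
    simp only [List.foldl_cons]
    rw [ih (r * pvWays (f - prev - 1)) f n]
    simp only [gapProd, pvWays_eq, mul_assoc]

lemma seg_eq_range : ∀ (L : Nat) (a : Int), (List.range L).map (fun j : Nat => a + (j:Int)) = seg a L := by
  intro L
  induction L with
  | zero => intro a; simp [seg]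
  | succ L ih =>
    intro a
    rw [List.range_succ_eq_map]
    simp only [List.map_cons, Nat.cast_zero, add_zero, List.map_map, seg]
    congr 1
    rw [← ih (a+1)]
    apply List.map_congr_left
    intro j _
    simp only [Function.comp_apply, Nat.succ_eq_add_one]
    push_cast
    ring

lemma array_eq (tc : Int) :
    (PySem.List.pyRange 0 tc 1).map (fun i => i + 1) = seg 1 tc.toNat := by
  rw [PySem.List.pyRange_one]
  rw [List.map_map]
  rw [show tc - 0 = tc from by ring]
  rw [← seg_eq_range tc.toNat 1]
  apply List.map_congr_left
  intro j _
  simp only [Function.comp_apply]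
  ring

-- ===== VERDICT (by name: the statement is the Claim_ definition above) =====
theorem get_all_ways_of_theater_seat_spec : Claim_equal_get_all_ways_of_theater_seat := by
  intro tc arr _dom hpre
  obtain ⟨pre, -⟩ := hpre
  unfold Spec_get_all_ways_of_theater_seat get_all_ways_of_theater_seat get_all_ways_of_theater_seat_alt
  rw [array_eq tc]
  set n : Int := if tc > 0 then tc else 0 with hn
  set fs : List Int := PySem.List.sorted
    (PySem.Set.ofList (arr.filter (fun s => decide (1 ≤ s) && decide (s ≤ n))))
    (fun x => x) false with hfs
  have hntc : n = (tc.toNat : Int) ∨ (n = 0 ∧ tc ≤ 0) := by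
    rw [hn]; split <;> omega
  have hmem : ∀ s : Int, s ∈ fs ↔ (s ∈ arr ∧ 1 ≤ s ∧ s ≤ n) := by
    intro s
    rw [hfs, PySem.List.mem_sorted, PySem.Set.mem_ofList, List.mem_filter]
    simp
  have hsub : ∀ s ∈ fs, s ∈ arr ∧ 1 ≤ s ∧ s ≤ tc := by
    intro s hs
    obtain ⟨h1, h2, h3⟩ := (hmem s).mp hs
    rcases hntc with h | ⟨h, _⟩ <;> exact ⟨h1, h2, by omega⟩
  have hpw2 : fs.Pairwise (fun x y => x + 2 ≤ y) := by
    have hlt := PySem.List.sorted_ofList_pairwise_lt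
      (arr.filter (fun s => decide (1 ≤ s) && decide (s ≤ n)))
    rw [← hfs] at hlt
    refine hlt.imp_of_mem ?_
    intro x y hx hy hxy
    obtain ⟨hxa, hx1, hxn⟩ := hsub x hx
    obtain ⟨hya, hy1, hyn⟩ := hsub y hy
    obtain ⟨hne1, hnm⟩ := pre y hya hy1 hyn
    by_contra hcon
    have hyx : y - 1 = x := by omega
    exact hnm (hyx ▸ hxa)
  have hhd : ∀ f ∈ fs.head?, 1 ≤ 0 + f - 1 := by
    intro f hf
    obtain ⟨hfa, hf1, hfn⟩ := hsub f (List.mem_of_mem_head? hf)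
    obtain ⟨hne1, _⟩ := pre f hfa hf1 hfn
    omega
  have hbd : ∀ s ∈ fs, 1 ≤ s ∧ s < 1 + (tc.toNat : Int) := by
    intro s hs
    obtain ⟨_, h1, h2⟩ := (hmem s).mp hs
    rcases hntc with h | ⟨h, _⟩ <;> (constructor; exact h1; omega)
  have hiffm : ∀ s : Int, 1 ≤ s → s < 1 + (tc.toNat : Int) → (arr.contains s = true ↔ s ∈ fs) := by
    intro s h1 h2
    rw [hmem s, List.contains_iff_mem]
    constructor
    · intro h
      refine ⟨h, h1, ?_⟩
      rcases hntc with hh | ⟨hh, hh2⟩ <;> omega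
    · exact fun h => h.1
  obtain ⟨r', c', m', eloop, hgm', hc', hval⟩ :=
    loopA_main fs tc.toNat 1 1 0 pvMemo0 arr goodMemo0 le_rfl hpw2 hbd hiffm hhd
  have hb : (1:Int) + (tc.toNat : Int) - 1 = n := by
    rcases hntc with h | ⟨h, h2⟩ <;> omega
  rw [hb] at hval
  have hg0 : (1:Int) - 1 - 0 = 0 := by ring
  rw [hg0] at hval
  -- B's value
  have hBval : (fs.foldl (fun (rp : Int × Int) s => (rp.1 * pvWays (s - rp.2 - 1), s)) (1, 0)).1 *
      pvWays (n - (fs.foldl (fun (rp : Int × Int) s => (rp.1 * pvWays (s - rp.2 - 1), s)) (1, 0)).2)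
      = 1 * gapProd 0 fs n := foldB fs 1 0 n
  show (match pvLoopA arr (seg 1 tc.toNat) 1 0 pvMemo0 with
      | none => 0
      | some (r, c, m) =>
        if c ≠ 0 then
          match pvFibo (c.toNat + 1) m c with
          | none => 0
          | some (v, _) => r * v
        else r)
    = (List.foldl (fun (rp : Int × Int) s => (rp.1 * pvWays (s - rp.2 - 1), s)) (1, 0) fs).1 *
        pvWays (n - (List.foldl (fun (rp : Int × Int) s => (rp.1 * pvWays (s - rp.2 - 1), s)) (1, 0) fs).2)
  rw [eloop, hBval]
  show (if c' ≠ 0 then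
          match pvFibo (c'.toNat + 1) m' c' with
          | none => 0
          | some (v, _) => r' * v
        else r') = 1 * gapProd 0 fs n
  by_cases h0 : c' = 0
  · rw [if_neg (by omega), ← hval, if_neg (by omega)]
  · obtain ⟨m2, efib, _⟩ := pvFibo_correct (c'.toNat + 1) m' c' hgm' (by omega) (by omega)
    rw [if_pos h0, efib, ← hval, if_pos h0]
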